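-- pv_equiv track=rewrite | github.com/windserpent/IoC-Hunter | ioc-hunter-linux/ioc_hunter/categories/process_execution.py | _is_attack_sequence
-- ===== SOURCE A (Python) =====
-- from typing import List, Dict, Any, Optional, Set
--
-- def _is_attack_sequence(event_types: List[str]) -> bool:
--     """Check if event sequence matches known attack patterns."""
--     sequence_str = ' -> '.join(event_types)
--
--     # Common attack sequences
--     attack_patterns = [
--         ["network_reconnaissance", "file_download", "reverse_shell_attempt"],
--         ["network_scanning", "suspicious_download", "persistence_attempt"],
--         ["network_monitoring", "file_transfer", "suspicious_process_execution"],
--         ["file_download", "interactive_shell_execution", "persistence_attempt"]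
--     ]
--
--     for pattern in attack_patterns:
--         if all(stage in event_types for stage in pattern):
--             return True
--
--     return False
-- ===== SOURCE B (Python) =====
-- # Inverted index: map each stage to the patterns containing it, then a single
-- # pass over the distinct events decrements per-pattern counters; a pattern is
-- # matched as soon as its counter reaches zero.
-- _ATTACK_PATTERNS = [
--     ["network_reconnaissance", "file_download", "reverse_shell_attempt"],
--     ["network_scanning", "suspicious_download", "persistence_attempt"],
--     ["network_monitoring", "file_transfer", "suspicious_process_execution"],
--     ["file_download", "interactive_shell_execution", "persistence_attempt"],
-- ]
--
-- _STAGE_TO_PATTERNS = {}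
-- for _idx, _pattern in enumerate(_ATTACK_PATTERNS):
--     for _stage in _pattern:
--         _STAGE_TO_PATTERNS.setdefault(_stage, []).append(_idx)
--
--
-- def _is_attack_sequence(event_types):
--     """Check if event sequence matches known attack patterns."""
--     remaining = [len(p) for p in _ATTACK_PATTERNS]
--     for event in set(event_types):
--         for idx in _STAGE_TO_PATTERNS.get(event, ()):
--             remaining[idx] -= 1
--             if remaining[idx] == 0:
--                 return True
--     return False
-- ===== Notes on version B (the rewrite author's own statement) =====
-- stated objective: alternative
-- what changed: Replaces the per-pattern membership scans (each of the four patterns re-scans event_types for every stage) with an inverted index from stage to pattern indices and per-pattern counters: one pass over the deduplicated events decrements counters and reports a match the moment any counter reaches zero.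
import Mathlib
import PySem

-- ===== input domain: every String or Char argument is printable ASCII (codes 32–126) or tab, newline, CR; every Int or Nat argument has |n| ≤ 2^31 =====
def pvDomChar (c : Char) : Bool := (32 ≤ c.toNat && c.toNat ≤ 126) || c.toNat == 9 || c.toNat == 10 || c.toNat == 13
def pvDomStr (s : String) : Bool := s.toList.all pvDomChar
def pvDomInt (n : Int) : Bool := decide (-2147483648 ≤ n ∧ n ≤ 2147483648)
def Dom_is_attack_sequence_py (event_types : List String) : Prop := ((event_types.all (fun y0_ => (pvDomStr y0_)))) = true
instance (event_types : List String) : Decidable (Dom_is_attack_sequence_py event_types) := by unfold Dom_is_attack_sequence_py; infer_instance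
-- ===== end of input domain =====

-- B replaces A's per-pattern membership scans by an inverted index (stage -> pattern
-- indices) with per-pattern counters, decremented in one pass over the distinct events.

-- ===== PORT A =====
def attackPatterns : List (List String) :=
  [ ["network_reconnaissance", "file_download", "reverse_shell_attempt"],
    ["network_scanning", "suspicious_download", "persistence_attempt"],
    ["network_monitoring", "file_transfer", "suspicious_process_execution"],
    ["file_download", "interactive_shell_execution", "persistence_attempt"] ]

-- the 'for pattern in attack_patterns: if all(stage in event_types ...): return True' loop
def aPatternLoop (event_types : List String) : List (List String) → Bool
  | [] => false
  | p :: rest =>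
    if p.all (fun stage => event_types.contains stage) then true
    else aPatternLoop event_types rest

def is_attack_sequence_py (event_types : List String) : Bool :=
  let _sequence_str := PySem.Str.join " -> " event_types
  aPatternLoop event_types attackPatterns

-- ===== PORT B =====
def bAttackPatterns : List (List String) :=
  [ ["network_reconnaissance", "file_download", "reverse_shell_attempt"],
    ["network_scanning", "suspicious_download", "persistence_attempt"],
    ["network_monitoring", "file_transfer", "suspicious_process_execution"],
    ["file_download", "interactive_shell_execution", "persistence_attempt"] ]

-- _STAGE_TO_PATTERNS: the dict Source B's module-level setdefault/append loops build,
-- written out in its Python insertion order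
def stageToPatterns : PySem.Dict String (List Nat) :=
  PySem.Dict.mk
    [ ("network_reconnaissance", [0]), ("file_download", [0, 3]), ("reverse_shell_attempt", [0]),
      ("network_scanning", [1]), ("suspicious_download", [1]), ("persistence_attempt", [1, 3]),
      ("network_monitoring", [2]), ("file_transfer", [2]), ("suspicious_process_execution", [2]),
      ("interactive_shell_execution", [3]) ]

-- inner 'for idx in _STAGE_TO_PATTERNS.get(event, ())' loop; none = early 'return True'
def bInner : List Int → List Nat → Option (List Int)
  | rem, [] => some rem
  | rem, i :: is =>
    let rem' := rem.set i (rem.getD i 0 - 1)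
    if rem'.getD i 0 = 0 then none else bInner rem' is

-- outer 'for event in set(event_types)' loop (its True/False result is independent of
-- the set's iteration order, so iterating the PySem.Set's list is exact)
def bOuter : List Int → List String → Bool
  | _, [] => false
  | rem, e :: es =>
    match bInner rem (PySem.Dict.getD stageToPatterns e []) with
    | none => true
    | some rem' => bOuter rem' es

def is_attack_sequence_py_alt (event_types : List String) : Bool :=
  bOuter (bAttackPatterns.map (fun p => (p.length : Int))) (PySem.Set.ofList event_types)

-- ===== PRECONDITION & SPEC =====
def Spec_is_attack_sequence_py (event_types : List String) (out : Bool) : Prop := out = is_attack_sequence_py_alt event_types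
instance (event_types : List String) (out : Bool) : Decidable (Spec_is_attack_sequence_py event_types out) := by unfold Spec_is_attack_sequence_py; infer_instance

-- ===== CLAIM (what is proved, stated in full; the proofs are below) =====
def Claim_equal_is_attack_sequence_py : Prop := ∀ (event_types : List String), Dom_is_attack_sequence_py event_types → Spec_is_attack_sequence_py event_types (is_attack_sequence_py event_types)

-- ===== LEMMAS AND PROOFS =====

-- the pattern-index list looked up for one event, as an explicit if-chain on the key
theorem stageToPatterns_getD (e : String) :
    PySem.Dict.getD stageToPatterns e [] =
      if e = "network_reconnaissance" then [0] else
      if e = "file_download" then [0, 3] else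
      if e = "reverse_shell_attempt" then [0] else
      if e = "network_scanning" then [1] else
      if e = "suspicious_download" then [1] else
      if e = "persistence_attempt" then [1, 3] else
      if e = "network_monitoring" then [2] else
      if e = "file_transfer" then [2] else
      if e = "suspicious_process_execution" then [2] else
      if e = "interactive_shell_execution" then [3] else [] := by
  by_cases h0 : e = "network_reconnaissance"
  · subst h0; decide
  by_cases h1 : e = "file_download"
  · subst h1; decide
  by_cases h2 : e = "reverse_shell_attempt"
  · subst h2; decide
  by_cases h3 : e = "network_scanning"
  · subst h3; decide
  by_cases h4 : e = "suspicious_download"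
  · subst h4; decide
  by_cases h5 : e = "persistence_attempt"
  · subst h5; decide
  by_cases h6 : e = "network_monitoring"
  · subst h6; decide
  by_cases h7 : e = "file_transfer"
  · subst h7; decide
  by_cases h8 : e = "suspicious_process_execution"
  · subst h8; decide
  by_cases h9 : e = "interactive_shell_execution"
  · subst h9; decide
  simp only [if_neg h0, if_neg h1, if_neg h2, if_neg h3, if_neg h4, if_neg h5,
    if_neg h6, if_neg h7, if_neg h8, if_neg h9]
  simp only [stageToPatterns, PySem.Dict.getD_eq_get?_getD, PySem.Dict.get?_mk_cons, beq_iff_eq]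
  simp [eq_comm, h0, h1, h2, h3, h4, h5, h6, h7, h8, h9, PySem.Dict.get?]

-- every looked-up index list has distinct entries, all below 4
set_option maxHeartbeats 1000000 in
theorem stageToPatterns_wf (e : String) :
    (PySem.Dict.getD stageToPatterns e []).Nodup ∧
      ∀ i ∈ PySem.Dict.getD stageToPatterns e [], i < 4 := by
  rw [stageToPatterns_getD]
  split_ifs <;> exact ⟨by decide, by decide⟩

theorem getD_set_eq (rem : List Int) (i : Nat) (v : Int) (h : i < rem.length) :
    (rem.set i v).getD i 0 = v := by
  simp [List.getD, h]

theorem getD_set_ne (rem : List Int) (i k : Nat) (v : Int) (h : k ≠ i) :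
    (rem.set i v).getD k 0 = rem.getD k 0 := by
  simp [List.getD, List.getElem?_set_ne (by omega : i ≠ k)]

theorem bInner_cons (rem : List Int) (i : Nat) (is : List Nat) :
    bInner rem (i :: is) =
      if (rem.set i (rem.getD i 0 - 1)).getD i 0 = 0 then none
      else bInner (rem.set i (rem.getD i 0 - 1)) is := rfl

-- the inner loop: early return iff some listed counter is exactly 1; otherwise each
-- listed counter is decremented once
theorem bInner_spec (I : List Nat) (rem : List Int) (hnd : I.Nodup)
    (hlt : ∀ i ∈ I, i < rem.length) :
    (bInner rem I = none ↔ ∃ i ∈ I, rem.getD i 0 = 1) ∧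
    (∀ rem', bInner rem I = some rem' →
      rem'.length = rem.length ∧
      ∀ k, rem'.getD k 0 = rem.getD k 0 - (if k ∈ I then 1 else 0)) := by
  induction I generalizing rem with
  | nil => simp [bInner]
  | cons i is ih =>
    have hi : i < rem.length := hlt i (List.mem_cons_self ..)
    have hnotmem : i ∉ is := (List.nodup_cons.mp hnd).1
    have hndt : is.Nodup := (List.nodup_cons.mp hnd).2
    have hset : (rem.set i (rem.getD i 0 - 1)).getD i 0 = rem.getD i 0 - 1 :=
      getD_set_eq rem i _ hi
    rw [bInner_cons, hset]
    by_cases hv : rem.getD i 0 = 1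
    · rw [if_pos (by omega)]
      constructor
      · simp only [true_iff]
        exact ⟨i, List.mem_cons_self .., hv⟩
      · intro rem' habs; cases habs
    · rw [if_neg (by omega)]
      have hlt' : ∀ j ∈ is, j < (rem.set i (rem.getD i 0 - 1)).length := by
        intro j hj
        simpa using hlt j (List.mem_cons_of_mem _ hj)
      obtain ⟨ih1, ih2⟩ := ih (rem.set i (rem.getD i 0 - 1)) hndt hlt'
      constructor
      · rw [ih1]
        constructor
        · rintro ⟨j, hj, h1⟩
          refine ⟨j, List.mem_cons_of_mem _ hj, ?_⟩
          rwa [getD_set_ne rem i j _ (fun h => hnotmem (h ▸ hj))] at h1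
        · rintro ⟨j, hj, h1⟩
          rcases List.mem_cons.mp hj with rfl | hj'
          · exact absurd h1 hv
          · exact ⟨j, hj', by rwa [getD_set_ne rem i j _ (fun h => hnotmem (h ▸ hj'))]⟩
      · intro rem' hsome
        obtain ⟨hl, hval⟩ := ih2 rem' hsome
        refine ⟨by simpa using hl, ?_⟩
        intro k
        rw [hval k]
        by_cases hk : k = i
        · subst hk
          rw [hset, if_neg hnotmem, if_pos (List.mem_cons_self ..)]
          omega
        · rw [getD_set_ne rem i k _ hk]
          simp [List.mem_cons, hk]

-- number of events in es that are stages of pattern i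
def cnt (i : Nat) (es : List String) : Nat :=
  es.countP (fun e => (PySem.Dict.getD stageToPatterns e []).contains i)

theorem cnt_cons (i : Nat) (e : String) (es : List String) :
    cnt i (e :: es) =
      cnt i es + (if i ∈ PySem.Dict.getD stageToPatterns e [] then 1 else 0) := by
  by_cases h : i ∈ PySem.Dict.getD stageToPatterns e [] <;>
    simp [cnt, h]

-- the outer loop returns true iff enough distinct stages of some pattern occur
theorem bOuter_spec (es : List String) (rem : List Int) (hlen : rem.length = 4)
    (hpos : ∀ i, i < 4 → 1 ≤ rem.getD i 0) :
    (bOuter rem es = true ↔ ∃ i, i < 4 ∧ rem.getD i 0 ≤ (cnt i es : Int)) := by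
  induction es generalizing rem with
  | nil =>
    simp only [bOuter, Bool.false_eq_true, false_iff]
    rintro ⟨i, hi, hle⟩
    have := hpos i hi
    simp only [cnt, List.countP_nil, Nat.cast_zero] at hle
    omega
  | cons e es ih =>
    obtain ⟨hnd, hbd⟩ := stageToPatterns_wf e
    have hlt : ∀ i ∈ PySem.Dict.getD stageToPatterns e [], i < rem.length := by
      intro i hi; rw [hlen]; exact hbd i hi
    obtain ⟨hnone, hsome⟩ := bInner_spec _ rem hnd hlt
    rcases h : bInner rem (PySem.Dict.getD stageToPatterns e []) with _ | rem'
    · simp only [bOuter, h, true_iff]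
      obtain ⟨i, hiI, h1⟩ := hnone.mp h
      refine ⟨i, hbd i hiI, ?_⟩
      rw [cnt_cons, if_pos hiI]
      push_cast
      have : (0 : Int) ≤ cnt i es := Int.natCast_nonneg _
      omega
    · have hne : ¬∃ i ∈ PySem.Dict.getD stageToPatterns e [], rem.getD i 0 = 1 := by
        rw [← hnone, h]; simp
      obtain ⟨hl, hval⟩ := hsome rem' h
      have hlen' : rem'.length = 4 := by omega
      have hpos' : ∀ i, i < 4 → 1 ≤ rem'.getD i 0 := by
        intro i hi4
        rw [hval i]
        by_cases hm : i ∈ PySem.Dict.getD stageToPatterns e []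
        · have h1 : rem.getD i 0 ≠ 1 := fun hc => hne ⟨i, hm, hc⟩
          have := hpos i hi4
          rw [if_pos hm]; omega
        · rw [if_neg hm]; simpa using hpos i hi4
      have hstep : bOuter rem (e :: es) = bOuter rem' es := by
        simp [bOuter, h]
      rw [hstep, ih rem' hlen' hpos']
      constructor
      · rintro ⟨i, hi4, hle⟩
        refine ⟨i, hi4, ?_⟩
        rw [hval i] at hle
        rw [cnt_cons]
        by_cases hm : i ∈ PySem.Dict.getD stageToPatterns e []
        · rw [if_pos hm] at hle; rw [if_pos hm]; push_cast at hle ⊢; omega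
        · rw [if_neg hm] at hle; rw [if_neg hm]; push_cast at hle ⊢; omega
      · rintro ⟨i, hi4, hle⟩
        refine ⟨i, hi4, ?_⟩
        rw [hval i]
        rw [cnt_cons] at hle
        by_cases hm : i ∈ PySem.Dict.getD stageToPatterns e []
        · rw [if_pos hm] at hle; rw [if_pos hm]; push_cast at hle ⊢; omega
        · rw [if_neg hm] at hle; rw [if_neg hm]; push_cast at hle ⊢; omega

-- countP of a 3-string disjunction over a duplicate-free list is the membership sum
theorem countP_three (a b c : String) (hab : a ≠ b) (hac : a ≠ c) (hbc : b ≠ c)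
    (l : List String) (hnd : l.Nodup) :
    l.countP (fun e => e == a || e == b || e == c) =
      (if a ∈ l then 1 else 0) + (if b ∈ l then 1 else 0) + (if c ∈ l then 1 else 0) := by
  induction l with
  | nil => simp
  | cons x t ih =>
    have hx : x ∉ t := (List.nodup_cons.mp hnd).1
    have hih := ih (List.nodup_cons.mp hnd).2
    rw [List.countP_cons, hih]
    by_cases ha : x = a
    · subst ha
      simp [hx, hab.symm, hac.symm, List.mem_cons, eq_comm]
      omega
    · by_cases hb : x = b
      · subst hb
        simp [hx, hab, hbc.symm, List.mem_cons, eq_comm]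
        omega
      · by_cases hc : x = c
        · subst hc
          simp [hx, hac, hbc, List.mem_cons]
        · have ha' : a ≠ x := fun h => ha h.symm
          have hb' : b ≠ x := fun h => hb h.symm
          have hc' : c ≠ x := fun h => hc h.symm
          simp [ha, hb, hc, ha', hb', hc', List.mem_cons]

-- the per-pattern membership predicates, as 3-string disjunctions
set_option maxHeartbeats 1000000 in
theorem pred_eq_0 (e : String) :
    ((PySem.Dict.getD stageToPatterns e []).contains 0) =
      (e == "network_reconnaissance" || e == "file_download" || e == "reverse_shell_attempt") := by
  rw [stageToPatterns_getD]
  split_ifs with h0 h1 h2 h3 h4 h5 h6 h7 h8 h9 <;>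
    first | (subst_vars; decide) | simp [h0, h1, h2]

set_option maxHeartbeats 1000000 in
theorem pred_eq_1 (e : String) :
    ((PySem.Dict.getD stageToPatterns e []).contains 1) =
      (e == "network_scanning" || e == "suspicious_download" || e == "persistence_attempt") := by
  rw [stageToPatterns_getD]
  split_ifs with h0 h1 h2 h3 h4 h5 h6 h7 h8 h9 <;>
    first | (subst_vars; decide) | simp [h3, h4, h5]

set_option maxHeartbeats 1000000 in
theorem pred_eq_2 (e : String) :
    ((PySem.Dict.getD stageToPatterns e []).contains 2) =
      (e == "network_monitoring" || e == "file_transfer" || e == "suspicious_process_execution") := by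
  rw [stageToPatterns_getD]
  split_ifs with h0 h1 h2 h3 h4 h5 h6 h7 h8 h9 <;>
    first | (subst_vars; decide) | simp [h6, h7, h8]

set_option maxHeartbeats 1000000 in
theorem pred_eq_3 (e : String) :
    ((PySem.Dict.getD stageToPatterns e []).contains 3) =
      (e == "file_download" || e == "interactive_shell_execution" || e == "persistence_attempt") := by
  rw [stageToPatterns_getD]
  split_ifs with h0 h1 h2 h3 h4 h5 h6 h7 h8 h9 <;>
    first | (subst_vars; decide) | simp [h1, h5, h9]

-- enough (= 3) distinct stages of pattern i iff all three stages are present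
theorem cnt_iff (a b c : String) (hab : a ≠ b) (hac : a ≠ c) (hbc : b ≠ c) (i : Nat)
    (hpred : ∀ e, ((PySem.Dict.getD stageToPatterns e []).contains i) = (e == a || e == b || e == c))
    (l : List String) (hnd : l.Nodup) :
    ((3 : Int) ≤ (cnt i l : Int)) ↔ (a ∈ l ∧ b ∈ l ∧ c ∈ l) := by
  have hc : cnt i l = l.countP (fun e => e == a || e == b || e == c) := by
    unfold cnt
    exact List.countP_congr (fun e _ => by rw [hpred e])
  rw [hc, countP_three a b c hab hac hbc l hnd]
  by_cases ha : a ∈ l <;> by_cases hb : b ∈ l <;> by_cases hcm : c ∈ l <;>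
    simp [ha, hb, hcm]

theorem A_char (l : List String) : is_attack_sequence_py l = true ↔
    (("network_reconnaissance" ∈ l ∧ "file_download" ∈ l ∧ "reverse_shell_attempt" ∈ l) ∨
     ("network_scanning" ∈ l ∧ "suspicious_download" ∈ l ∧ "persistence_attempt" ∈ l) ∨
     ("network_monitoring" ∈ l ∧ "file_transfer" ∈ l ∧ "suspicious_process_execution" ∈ l) ∨
     ("file_download" ∈ l ∧ "interactive_shell_execution" ∈ l ∧ "persistence_attempt" ∈ l)) := by
  simp [is_attack_sequence_py, aPatternLoop, attackPatterns, List.all_cons, List.all_nil]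

theorem B_char (l : List String) : is_attack_sequence_py_alt l = true ↔
    (("network_reconnaissance" ∈ l ∧ "file_download" ∈ l ∧ "reverse_shell_attempt" ∈ l) ∨
     ("network_scanning" ∈ l ∧ "suspicious_download" ∈ l ∧ "persistence_attempt" ∈ l) ∨
     ("network_monitoring" ∈ l ∧ "file_transfer" ∈ l ∧ "suspicious_process_execution" ∈ l) ∨
     ("file_download" ∈ l ∧ "interactive_shell_execution" ∈ l ∧ "persistence_attempt" ∈ l)) := by
  have hinit : (bAttackPatterns.map (fun p => (p.length : Int))) = [3, 3, 3, 3] := by decide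
  have hmem : ∀ s : String, s ∈ PySem.Set.ofList l ↔ s ∈ l := fun s => PySem.Set.mem_ofList l s
  have hnd : (PySem.Set.ofList l).Nodup := PySem.Set.nodup_ofList l
  unfold is_attack_sequence_py_alt
  rw [hinit, bOuter_spec (PySem.Set.ofList l) [3, 3, 3, 3] (by decide)
    (by intro i hi; interval_cases i <;> decide)]
  have e0 := cnt_iff _ _ _ (by decide) (by decide) (by decide) 0 pred_eq_0 _ hnd
  have e1 := cnt_iff _ _ _ (by decide) (by decide) (by decide) 1 pred_eq_1 _ hnd
  have e2 := cnt_iff _ _ _ (by decide) (by decide) (by decide) 2 pred_eq_2 _ hnd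
  have e3 := cnt_iff _ _ _ (by decide) (by decide) (by decide) 3 pred_eq_3 _ hnd
  constructor
  · rintro ⟨i, hi4, hle⟩
    have hg : ([3, 3, 3, 3] : List Int).getD i 0 = 3 := by interval_cases i <;> decide
    rw [hg] at hle
    interval_cases i
    · exact Or.inl ((hmem _).mp ((e0.mp hle).1) |> fun m1 =>
        ⟨m1, (hmem _).mp ((e0.mp hle).2.1), (hmem _).mp ((e0.mp hle).2.2)⟩)
    · exact Or.inr (Or.inl ⟨(hmem _).mp ((e1.mp hle).1), (hmem _).mp ((e1.mp hle).2.1),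
        (hmem _).mp ((e1.mp hle).2.2)⟩)
    · exact Or.inr (Or.inr (Or.inl ⟨(hmem _).mp ((e2.mp hle).1), (hmem _).mp ((e2.mp hle).2.1),
        (hmem _).mp ((e2.mp hle).2.2)⟩))
    · exact Or.inr (Or.inr (Or.inr ⟨(hmem _).mp ((e3.mp hle).1), (hmem _).mp ((e3.mp hle).2.1),
        (hmem _).mp ((e3.mp hle).2.2)⟩))
  · rintro (⟨m1, m2, m3⟩ | ⟨m1, m2, m3⟩ | ⟨m1, m2, m3⟩ | ⟨m1, m2, m3⟩)
    · exact ⟨0, by omega, e0.mpr ⟨(hmem _).mpr m1, (hmem _).mpr m2, (hmem _).mpr m3⟩⟩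
    · exact ⟨1, by omega, e1.mpr ⟨(hmem _).mpr m1, (hmem _).mpr m2, (hmem _).mpr m3⟩⟩
    · exact ⟨2, by omega, e2.mpr ⟨(hmem _).mpr m1, (hmem _).mpr m2, (hmem _).mpr m3⟩⟩
    · exact ⟨3, by omega, e3.mpr ⟨(hmem _).mpr m1, (hmem _).mpr m2, (hmem _).mpr m3⟩⟩

-- ===== VERDICT (by name: the statement is the Claim_ definition above) =====
theorem is_attack_sequence_py_spec : Claim_equal_is_attack_sequence_py := by
  intro l _
  unfold Spec_is_attack_sequence_py
  rw [Bool.eq_iff_iff, A_char, B_char]
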